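-- pv_equiv track=rewrite | github.com/KonovalovIlya/Projekt | Module19/Task19-5.py | dict_rev
-- ===== SOURCE A (Python) =====
-- def dict_rev(string_):
--   dict_ = {
--     string_.count(symbol): set(j_symbol
--                             for j_symbol in string_
--                             if string_.count(symbol) == string_.count(j_symbol))
--     for symbol in string_
--   }
--   return dict_
-- ===== SOURCE B (Python) =====
-- def dict_rev(string_):
--   counts = {}
--   for ch in string_:
--     counts[ch] = counts.get(ch, 0) + 1
--   result = {}
--   for ch, cnt in counts.items():
--     group = result.setdefault(cnt, set())
--     group.add(ch)
--   return result
-- ===== Notes on version B (the rewrite author's own statement) =====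
-- stated objective: faster
-- what changed: A rescans the whole string with .count for every character (and again inside the value comprehension); B builds a frequency table in one pass and then inverts it in a second pass over the table, with no per-character rescans.
import Mathlib
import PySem

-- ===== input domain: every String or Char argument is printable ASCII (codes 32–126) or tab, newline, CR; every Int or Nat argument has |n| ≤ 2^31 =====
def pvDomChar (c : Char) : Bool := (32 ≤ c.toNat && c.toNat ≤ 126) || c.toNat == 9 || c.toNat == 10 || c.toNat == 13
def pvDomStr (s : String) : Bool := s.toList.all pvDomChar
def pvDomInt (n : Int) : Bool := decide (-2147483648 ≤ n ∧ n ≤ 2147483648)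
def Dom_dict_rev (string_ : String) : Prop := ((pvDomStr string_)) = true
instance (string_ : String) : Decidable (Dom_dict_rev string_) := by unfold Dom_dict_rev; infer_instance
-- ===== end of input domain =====

-- B replaces A's per-character full-string .count rescans by one counting pass plus one inversion pass over the frequency table (objective: faster).

-- ===== PORT A =====
-- dict comprehension over string_: key = string_.count(symbol) (str.count of a 1-char
-- needle = character count — exact here), value = set(j for j in string_ if the counts are equal).
def dict_rev (string_ : String) : List (Int × List String) :=
  let s := string_.toList
  (s.foldl
    (fun d sym =>
      d.insert ((s.count sym : Int))
        (PySem.Set.ofList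
          ((s.filter (fun j => ((s.count sym : Int)) == ((s.count j : Int)))).map
            (fun c => String.ofList [c]))))
    PySem.Dict.empty).items

-- ===== PORT B =====
-- pass 1: frequency table counts[ch] = counts.get(ch, 0) + 1; pass 2: invert it over
-- counts.items(): result.setdefault(cnt, set()).add(ch)  (= modify cnt with default ∅, add the char).
def dict_rev_alt (string_ : String) : List (Int × List String) :=
  let s := string_.toList
  let counts : PySem.Dict Char Int :=
    s.foldl (fun d ch => d.insert ch (d.getD ch 0 + 1)) PySem.Dict.empty
  let result : PySem.Dict Int (List String) :=
    counts.items.foldl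
      (fun r p => r.modify p.2 [] (fun g => PySem.Set.add g (String.ofList [p.1])))
      PySem.Dict.empty
  result.items

-- ===== PRECONDITION & SPEC =====
def Spec_dict_rev (string_ : String) (out : List (Int × List String)) : Prop := out = dict_rev_alt string_
instance (string_ : String) (out : List (Int × List String)) : Decidable (Spec_dict_rev string_ out) := by unfold Spec_dict_rev; infer_instance

-- ===== CLAIM (what is proved, stated in full; the proofs are below) =====
def Claim_equal_dict_rev : Prop := ∀ (string_ : String), Dom_dict_rev string_ → Spec_dict_rev string_ (dict_rev string_)

-- ===== LEMMAS AND PROOFS =====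

def fdedup {α : Type} [BEq α] : List α → List α
  | [] => []
  | x :: xs => x :: fdedup (xs.filter (fun y => !(y == x)))
termination_by l => l.length
decreasing_by simpa using le_trans (List.length_filter_le _ _) (Nat.le_of_eq List.length_attach)

theorem fdedup_nil {α : Type} [BEq α] : fdedup ([] : List α) = [] := by rw [fdedup]
theorem fdedup_cons {α : Type} [BEq α] (x : α) (xs : List α) :
    fdedup (x :: xs) = x :: fdedup (xs.filter (fun y => !(y == x))) := by rw [fdedup]

theorem update_eq_append_fdedup {α : Type} [BEq α] [LawfulBEq α] :
    ∀ (n : Nat) (l : List α), l.length ≤ n → ∀ (s : PySem.Set α),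
      PySem.Set.update s l = s ++ fdedup (l.filter (fun x => !(s.contains x))) := by
  intro n
  induction n with
  | zero =>
    intro l hl s
    have : l = [] := by cases l <;> simp_all
    subst this
    simp [PySem.Set.update, fdedup_nil]
  | succ n ih =>
    intro l hl s
    cases l with
    | nil => simp [PySem.Set.update, fdedup_nil]
    | cons x xs =>
      have hx : PySem.Set.update s (x :: xs) = PySem.Set.update (PySem.Set.add s x) xs := rfl
      by_cases hm : x ∈ s
      · have hadd : PySem.Set.add s x = s := by simp [PySem.Set.add, hm]
        rw [hx, hadd, ih xs (by simpa using Nat.le_of_succ_le_succ hl)]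
        simp [List.filter_cons, hm]
      · have hadd : PySem.Set.add s x = s ++ [x] := by simp [PySem.Set.add, hm]
        rw [hx, hadd, ih xs (by simpa using Nat.le_of_succ_le_succ hl)]
        have hpred : List.filter (fun y => !((s ++ [x]).contains y)) xs
            = List.filter (fun y => !(y == x)) (List.filter (fun y => !(s.contains y)) xs) := by
          rw [List.filter_filter]
          apply List.filter_congr
          intro y _
          by_cases hy : y = x <;> simp [hy, hm]
        rw [hpred]
        simp [List.filter_cons, hm, fdedup_cons]

theorem ofList_eq_fdedup {α : Type} [BEq α] [LawfulBEq α] (l : List α) :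
    PySem.Set.ofList l = fdedup l := by
  have h := update_eq_append_fdedup l.length l le_rfl PySem.Set.empty
  rw [PySem.Set.update_empty] at h
  rw [h]
  have : List.filter (fun x => !(PySem.Set.empty : PySem.Set α).contains x) l = l := by
    apply List.filter_eq_self.mpr
    intro y _
    simp [PySem.Set.empty]
  rw [this]
  rfl

theorem filter_map_filter_ne {α β : Type} [BEq α] [LawfulBEq α] [BEq β] [LawfulBEq β]
    (f : α → β) (x : α) (q : β → Bool) (hq : q (f x) = false) :
    ∀ (xs : List α),
      ((xs.filter (fun y => !(y == x))).map f).filter q = (xs.map f).filter q := by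
  intro xs
  induction xs with
  | nil => simp
  | cons y ys ih =>
    by_cases hy : y = x
    · subst hy
      simp [List.filter_cons, hq, ih]
    · simp only [List.filter_cons, List.map_cons]
      have : (!(y == x)) = true := by simp [hy]
      rw [this]
      simp only [List.map_cons, List.filter_cons]
      cases hq2 : q (f y) <;> simp [List.filter_cons, hq2, ih]

theorem fdedup_map_fdedup_filter {α β : Type} [BEq α] [LawfulBEq α] [BEq β] [LawfulBEq β]
    (f : α → β) :
    ∀ (n : Nat) (m : List α), m.length ≤ n → ∀ (q : β → Bool),
      fdedup (((fdedup m).map f).filter q) = fdedup ((m.map f).filter q) := by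
  intro n
  induction n with
  | zero =>
    intro m hm q
    have : m = [] := by cases m <;> simp_all
    subst this; simp [fdedup_nil]
  | succ n ih =>
    intro m hm q
    cases m with
    | nil => simp [fdedup_nil]
    | cons x xs =>
      have hlen : (xs.filter (fun y => !(y == x))).length ≤ n :=
        le_trans (List.length_filter_le _ _) (by simpa using Nat.le_of_succ_le_succ hm)
      rw [fdedup_cons]
      cases hqx : q (f x) with
      | true =>
        simp only [List.map_cons, List.filter_cons, hqx, if_true]
        rw [fdedup_cons, fdedup_cons, List.filter_filter, List.filter_filter,
            ih _ hlen (fun z => !(z == f x) && q z),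
            filter_map_filter_ne f x (fun z => !(z == f x) && q z) (by simp)]
      | false =>
        simp only [List.map_cons, List.filter_cons, hqx, Bool.false_eq_true, if_false]
        rw [ih _ hlen q, filter_map_filter_ne f x q hqx]

theorem fdedup_map_fdedup {α β : Type} [BEq α] [LawfulBEq α] [BEq β] [LawfulBEq β]
    (f : α → β) (m : List α) :
    fdedup ((fdedup m).map f) = fdedup (m.map f) := by
  have h := fdedup_map_fdedup_filter f m.length m le_rfl (fun _ => true)
  simpa using h

theorem fdedup_filter {α : Type} [BEq α] [LawfulBEq α] :
    ∀ (n : Nat) (m : List α), m.length ≤ n → ∀ (p : α → Bool),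
      fdedup (m.filter p) = (fdedup m).filter p := by
  intro n
  induction n with
  | zero =>
    intro m hm p
    have : m = [] := by cases m <;> simp_all
    subst this; simp [fdedup_nil]
  | succ n ih =>
    intro m hm p
    cases m with
    | nil => simp [fdedup_nil]
    | cons x xs =>
      have hlen : (xs.filter (fun y => !(y == x))).length ≤ n :=
        le_trans (List.length_filter_le _ _) (by simpa using Nat.le_of_succ_le_succ hm)
      cases hp : p x with
      | true =>
        simp only [List.filter_cons, hp, if_true]
        rw [fdedup_cons, fdedup_cons, List.filter_cons]
        simp only [hp, if_true]
        rw [List.filter_filter]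
        congr 1
        have hcomm : List.filter (fun a => !(a == x) && p a) xs
            = List.filter (fun a => p a && !(a == x)) xs := by
          apply List.filter_congr; intro y _; rw [Bool.and_comm]
        rw [hcomm, ← List.filter_filter, ih _ hlen p]
      | false =>
        simp only [List.filter_cons, hp, Bool.false_eq_true, if_false]
        rw [fdedup_cons, List.filter_cons]
        simp only [hp, Bool.false_eq_true, if_false]
        have hsame : List.filter p xs = List.filter p (List.filter (fun y => !(y == x)) xs) := by
          rw [List.filter_filter]
          apply List.filter_congr
          intro y _
          cases hy : p y with
          | true =>
            have : y ≠ x := fun h => by subst h; rw [hy] at hp; cases hp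
            simp [this, hy]
          | false => simp [hy]
        rw [hsame, ih _ hlen p]

theorem fdedup_map_inj {α β : Type} [BEq α] [LawfulBEq α] [BEq β] [LawfulBEq β]
    (f : α → β) (hf : Function.Injective f) :
    ∀ (n : Nat) (m : List α), m.length ≤ n → fdedup (m.map f) = (fdedup m).map f := by
  intro n
  induction n with
  | zero =>
    intro m hm
    have : m = [] := by cases m <;> simp_all
    subst this; simp [fdedup_nil]
  | succ n ih =>
    intro m hm
    cases m with
    | nil => simp [fdedup_nil]
    | cons x xs =>
      have hlen : (xs.filter (fun y => !(y == x))).length ≤ n :=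
        le_trans (List.length_filter_le _ _) (by simpa using Nat.le_of_succ_le_succ hm)
      rw [List.map_cons, fdedup_cons, fdedup_cons, List.map_cons]
      have hfm : List.filter (fun z => !(z == f x)) (List.map f xs)
          = List.map f (List.filter (fun y => !(y == x)) xs) := by
        rw [List.filter_map]
        congr 1
        apply List.filter_congr
        intro y _
        simp [Function.comp, hf.eq_iff]
      rw [hfm, ih _ hlen]

theorem getD_foldl_insert_keyfun {α : Type} (key : α → Int) (g : Int → List String) :
    ∀ (l : List α) (d : PySem.Dict Int (List String)) (k : Int),
      (l.foldl (fun d x => d.insert (key x) (g (key x))) d).getD k []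
        = if k ∈ l.map key then g k else d.getD k [] := by
  intro l
  induction l with
  | nil => intro d k; simp
  | cons x xs ih =>
    intro d k
    rw [List.foldl_cons, ih]
    by_cases hmem : k ∈ xs.map key
    · simp [hmem]
    · rw [if_neg hmem, PySem.Dict.getD_insert]
      by_cases hk : k = key x
      · simp [hk]
      · simp [hk, hmem]

theorem getD_foldl_modify_group :
    ∀ (lp : List (Char × Int)) (d : PySem.Dict Int (List String)) (k : Int),
      (lp.foldl (fun r p => r.modify p.2 [] (fun g => PySem.Set.add g (String.ofList [p.1]))) d).getD k []
        = (lp.filter (fun p => p.2 == k)).foldl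
            (fun g p => PySem.Set.add g (String.ofList [p.1])) (d.getD k []) := by
  intro lp
  induction lp with
  | nil => intro d k; simp
  | cons p ps ih =>
    intro d k
    rw [List.foldl_cons, ih, List.filter_cons]
    by_cases hk : p.2 = k
    · have : (p.2 == k) = true := by simp [hk]
      rw [this]
      simp only [if_true, List.foldl_cons]
      congr 1
      rw [PySem.Dict.getD_modify]
      simp [hk]
    · have : (p.2 == k) = false := by simp [hk]
      rw [this]
      simp only [Bool.false_eq_true, if_false]
      congr 1
      rw [PySem.Dict.getD_modify]
      have : ¬ (k = p.2) := fun h => hk h.symm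
      simp [this]

theorem fdedup_idem {α : Type} [BEq α] [LawfulBEq α] (l : List α) :
    fdedup (fdedup l) = fdedup l := by
  rw [← ofList_eq_fdedup (fdedup l)]
  rw [← ofList_eq_fdedup l]
  exact PySem.Set.ofList_eq_self_of_nodup _ (by rw [ofList_eq_fdedup]; rw [← ofList_eq_fdedup]; exact PySem.Set.nodup_ofList l)

theorem single_inj : Function.Injective (fun c => String.ofList [c]) := by
  intro a b h
  have := congrArg String.toList h
  simpa using this


theorem itemsA (s : List Char) (key : Char → Int) (g : Int → List String) :
    (s.foldl (fun d sym => d.insert (key sym) (g (key sym))) PySem.Dict.empty).items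
      = (fdedup (s.map key)).map (fun k => (k, g k)) := by
  have hnd : (s.foldl (fun d sym => d.insert (key sym) (g (key sym))) PySem.Dict.empty).keys.Nodup :=
    PySem.Dict.nodup_keys_foldl_insert_key s key (fun _ x => g (key x)) PySem.Dict.empty
      (by rw [PySem.Dict.keys_empty]; exact List.nodup_nil)
  rw [PySem.Dict.items_eq_map_keys _ hnd []]
  have hkeys : (s.foldl (fun d sym => d.insert (key sym) (g (key sym))) PySem.Dict.empty).keys
      = fdedup (s.map key) := by
    rw [PySem.Dict.keys_foldl_insert_key s key (fun _ x => g (key x)) PySem.Dict.empty,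
        PySem.Dict.keys_empty]
    rw [show ([] : List Int) = PySem.Set.empty from rfl, PySem.Set.update_empty,
        ofList_eq_fdedup]
  rw [hkeys]
  apply List.map_congr_left
  intro k hk
  have hmem : k ∈ s.map key := by
    rw [← ofList_eq_fdedup] at hk
    exact (PySem.Set.mem_ofList _ _).mp hk
  rw [getD_foldl_insert_keyfun key g s PySem.Dict.empty k, if_pos hmem]

theorem itemsB (lp : List (Char × Int)) :
    (lp.foldl (fun r p => r.modify p.2 [] (fun g => PySem.Set.add g (String.ofList [p.1])))
        PySem.Dict.empty).items
      = (fdedup (lp.map (·.2))).map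
          (fun k => (k, PySem.Set.ofList
            ((lp.filter (fun p => p.2 == k)).map (fun p => String.ofList [p.1])))) := by
  have hnd : (lp.foldl (fun r p => r.modify p.2 [] (fun g => PySem.Set.add g (String.ofList [p.1])))
      PySem.Dict.empty).keys.Nodup :=
    PySem.Dict.nodup_keys_foldl_modify_key lp (·.2) []
      (fun _ p => fun g => PySem.Set.add g (String.ofList [p.1])) PySem.Dict.empty
      (by rw [PySem.Dict.keys_empty]; exact List.nodup_nil)
  rw [PySem.Dict.items_eq_map_keys _ hnd []]
  have hkeys : (lp.foldl (fun r p => r.modify p.2 [] (fun g => PySem.Set.add g (String.ofList [p.1])))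
      PySem.Dict.empty).keys = fdedup (lp.map (·.2)) := by
    rw [PySem.Dict.keys_foldl_modify_key lp (·.2) []
        (fun _ p => fun g => PySem.Set.add g (String.ofList [p.1])) PySem.Dict.empty,
        PySem.Dict.keys_empty]
    rw [show ([] : List Int) = PySem.Set.empty from rfl, PySem.Set.update_empty,
        ofList_eq_fdedup]
  rw [hkeys]
  apply List.map_congr_left
  intro k _
  rw [getD_foldl_modify_group lp PySem.Dict.empty k, PySem.Dict.getD_empty]
  congr 1
  rw [show ([] : List String) = PySem.Set.empty from rfl,
      ← PySem.Set.update_empty, PySem.Set.update_map_eq_foldl_add]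

set_option maxRecDepth 4096 in
theorem closed_eq (s : List Char) :
    (fdedup (s.map (fun sym => ((s.count sym : Int))))).map
        (fun k => (k, PySem.Set.ofList
          ((s.filter (fun j => k == ((s.count j : Int)))).map (fun c => String.ofList [c]))))
      = (fdedup (((PySem.Set.ofList s).map (fun c => (c, ((s.count c : Int))))).map (·.2))).map
          (fun k => (k, PySem.Set.ofList
            ((((PySem.Set.ofList s).map (fun c => (c, ((s.count c : Int))))).filter
                (fun p => p.2 == k)).map (fun p => String.ofList [p.1])))) := by
  have hmm : (((PySem.Set.ofList s).map (fun c => (c, ((s.count c : Int))))).map (·.2))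
      = (PySem.Set.ofList s).map (fun c => ((s.count c : Int))) := by
    rw [List.map_map]; rfl
  rw [hmm, ofList_eq_fdedup s, fdedup_map_fdedup]
  apply List.map_congr_left
  intro k _
  congr 1
  rw [List.filter_map, List.map_map]
  simp only [Function.comp_def]
  have hsw : s.filter (fun j => k == ((s.count j : Int)))
      = s.filter (fun j => ((s.count j : Int)) == k) := by
    apply List.filter_congr
    intro y _
    rw [Bool.eq_iff_iff]
    simp only [beq_iff_eq]
    exact eq_comm
  rw [hsw]
  rw [ofList_eq_fdedup, ofList_eq_fdedup]
  rw [fdedup_map_inj _ single_inj _ _ le_rfl,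
      fdedup_map_inj _ single_inj _ _ le_rfl,
      fdedup_filter _ _ le_rfl,
      fdedup_filter _ _ le_rfl,
      fdedup_idem]
theorem ports_eq (string_ : String) : dict_rev string_ = dict_rev_alt string_ := by
  have h1 : dict_rev string_
      = (fdedup ((string_.toList).map (fun sym => ((string_.toList.count sym : Int))))).map
          (fun k => (k, PySem.Set.ofList
            ((string_.toList.filter (fun j => k == ((string_.toList.count j : Int)))).map
              (fun c => String.ofList [c])))) :=
    itemsA string_.toList (fun sym => ((string_.toList.count sym : Int)))
      (fun k => PySem.Set.ofList
        ((string_.toList.filter (fun j => k == ((string_.toList.count j : Int)))).map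
          (fun c => String.ofList [c])))
  have h2 : dict_rev_alt string_
      = (fdedup (((string_.toList.foldl (fun d ch => d.insert ch (d.getD ch 0 + 1))
            PySem.Dict.empty).items).map (·.2))).map
          (fun k => (k, PySem.Set.ofList
            ((((string_.toList.foldl (fun d ch => d.insert ch (d.getD ch 0 + 1))
                PySem.Dict.empty).items).filter (fun p => p.2 == k)).map
              (fun p => String.ofList [p.1])))) :=
    itemsB (((string_.toList.foldl (fun d ch => d.insert ch (d.getD ch 0 + 1))
      PySem.Dict.empty : PySem.Dict Char Int)).items)
  rw [PySem.Dict.foldl_insert_getD_add_one_eq_counter, PySem.Dict.items_counter] at h2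
  rw [h1, h2]
  exact closed_eq string_.toList

-- ===== VERDICT (by name: the statement is the Claim_ definition above) =====
theorem dict_rev_spec : Claim_equal_dict_rev := by
  intro string_ _
  show dict_rev string_ = dict_rev_alt string_
  exact ports_eq string_
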